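-- pv_equiv track=rewrite | github.com/thamin-i/advent-of-code-2025 | advent_of_code_2025/day_11/part_02.py | prune_non_used_nodes_in_graph
-- ===== SOURCE A (Python) =====
-- import typing as t
-- from collections import defaultdict
--
-- def reverse_graph(graph: t.Dict[str, t.List[str]]) -> t.Dict[str, t.List[str]]:
--     """Reverse the graph direction.
--
--     Args:
--         graph (t.Dict[str, t.List[str]]): Graph as a dictionary.
--
--     Returns:
--         t.Dict[str, t.List[str]]: Reversed graph as a dictionary.
--     """
--     reversed_graph: t.Dict[str, t.List[str]] = defaultdict(list)
--     for node, neighbors in graph.items():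
--         for neighbor in neighbors:
--             reversed_graph[neighbor].append(node)
--     return reversed_graph
--
-- def node_reachable_from(
--     graph: t.Dict[str, t.List[str]], node: str
-- ) -> t.Set[str]:
--     """Return the set of nodes reachable from the given node in the graph.
--
--     Args:
--         graph (t.Dict[str, t.List[str]]): Graph as a dictionary.
--         node (str): Starting node.
--
--     Returns:
--         t.Set[str]: Set of reachable nodes.
--     """
--     visited: t.Set[str] = set()
--     stack: t.List[str] = [node]
--     while stack:
--         current_node: str = stack.pop()
--         if current_node not in visited:
--             visited.add(current_node)
--             stack.extend(graph.get(current_node, []))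
--     return visited
--
-- def prune_non_used_nodes_in_graph(
--     graph: t.Dict[str, t.List[str]], start_node: str, end_node: str
-- ) -> t.Dict[str, t.List[str]]:
--     """Prune nodes that are not reachable
--         from the start node or cannot reach the end node.
--
--     Args:
--         graph (t.Dict[str, t.List[str]]): Graph as a dictionary.
--         start_node (str): Start node.
--         end_node (str): End node.
--
--     Returns:
--         t.Dict[str, t.List[str]]: Pruned graph as a dictionary.
--     """
--     from_start: t.Set[str] = node_reachable_from(graph, start_node)
--     to_end: t.Set[str] = node_reachable_from(reverse_graph(graph), end_node)
--     keep: t.Set[str] = from_start & to_end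
--     return {
--         node: [n for n in neighbors if n in keep]
--         for node, neighbors in graph.items()
--         if node in keep
--     }
-- ===== SOURCE B (Python) =====
-- def prune_non_used_nodes_in_graph(graph, start_node, end_node):
--     """Prune nodes not on any start->end path.
--
--     Bellman-Ford-style saturation: flatten the graph into an edge list once,
--     then grow each reachability set by repeated full passes over that edge
--     list until a pass adds nothing.  No reversed adjacency map and no
--     DFS/BFS worklist is built; the backward set just follows edges
--     target-to-source.
--     """
--     edges = [(u, v) for u, neighbors in graph.items() for v in neighbors]
--
--     from_start = {start_node}
--     changed = True
--     while changed:
--         changed = False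
--         for u, v in edges:
--             if u in from_start and v not in from_start:
--                 from_start.add(v)
--                 changed = True
--
--     to_end = {end_node}
--     changed = True
--     while changed:
--         changed = False
--         for u, v in edges:
--             if v in to_end and u not in to_end:
--                 to_end.add(u)
--                 changed = True
--
--     return {
--         u: [v for v in neighbors if v in from_start and v in to_end]
--         for u, neighbors in graph.items()
--         if u in from_start and u in to_end
--     }
-- ===== Notes on version B (the rewrite author's own statement) =====
-- stated objective: alternative
-- what changed: Both reachability sets are grown by Bellman-Ford-style saturation passes over a flat edge list (repeat scanning all edges until a pass adds nothing), replacing A's explicit-stack DFS worklists and eliminating the reversed adjacency map entirely (the backward set follows edges target-to-source).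
import Mathlib
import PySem

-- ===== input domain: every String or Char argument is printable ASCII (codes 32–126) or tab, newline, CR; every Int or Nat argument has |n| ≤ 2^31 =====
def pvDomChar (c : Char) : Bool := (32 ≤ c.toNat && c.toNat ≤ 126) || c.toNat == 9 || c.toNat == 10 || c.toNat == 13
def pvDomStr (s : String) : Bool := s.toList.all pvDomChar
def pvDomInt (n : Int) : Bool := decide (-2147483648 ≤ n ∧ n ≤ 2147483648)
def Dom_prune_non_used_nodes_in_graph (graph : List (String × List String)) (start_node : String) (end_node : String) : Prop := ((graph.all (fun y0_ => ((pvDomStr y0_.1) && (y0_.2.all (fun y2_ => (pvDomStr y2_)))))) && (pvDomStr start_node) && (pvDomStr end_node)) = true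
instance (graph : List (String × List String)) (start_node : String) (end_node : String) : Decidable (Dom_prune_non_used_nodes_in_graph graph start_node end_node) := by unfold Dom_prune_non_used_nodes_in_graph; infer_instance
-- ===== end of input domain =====

-- B replaces A's two explicit-stack DFS searches and its reversed adjacency map by
-- Bellman-Ford-style saturation over a flat edge list (repeat full passes over the edges
-- until a pass adds nothing; the backward set follows edges target-to-source);
-- same return value (objective: alternative).

-- ----- termination helpers (cited by the ports' decreasing_by; not part of either algorithm) -----

/-- All node names occurring in the dict (keys and neighbour-list entries). -/
def pvUniv (g : PySem.Dict String (List String)) : List String := g.keys ++ g.values.flatten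

/-- Number of universe elements not yet visited — the loop variant of both searches. -/
def pvUnvisited (univ vis : List String) : Nat :=
  (univ.filter (fun x => decide (x ∉ vis))).length

theorem pvUnvisited_mono (univ vis vis' : List String)
    (h : ∀ x, x ∈ vis → x ∈ vis') : pvUnvisited univ vis' ≤ pvUnvisited univ vis := by
  unfold pvUnvisited
  simp only [← List.countP_eq_length_filter]
  apply List.countP_mono_left
  intro x _ hx
  simp only [decide_eq_true_eq] at hx ⊢
  exact fun hm => hx (h x hm)

theorem pvUnvisited_lt (univ vis vis' : List String)
    (h : ∀ x, x ∈ vis → x ∈ vis') (w : String)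
    (hwu : w ∈ univ) (hw' : w ∈ vis') (hw : w ∉ vis) :
    pvUnvisited univ vis' < pvUnvisited univ vis := by
  induction univ with
  | nil => cases hwu
  | cons a l ih =>
    unfold pvUnvisited
    rw [List.filter_cons, List.filter_cons]
    rcases List.mem_cons.mp hwu with rfl | hl
    · rw [decide_eq_false (by simpa using hw'), decide_eq_true hw]
      exact Nat.lt_succ_of_le (pvUnvisited_mono l vis vis' h)
    · have hil := ih hl
      unfold pvUnvisited at hil
      by_cases ha' : a ∈ vis'
      · rw [decide_eq_false (by simpa using ha')]
        by_cases ha : a ∈ vis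
        · rw [decide_eq_false (by simpa using ha)]
          exact hil
        · rw [decide_eq_true ha]
          exact Nat.lt_succ_of_lt hil
      · have ha : a ∉ vis := fun hm => ha' (h a hm)
        rw [decide_eq_true ha', decide_eq_true ha]
        simpa using Nat.succ_lt_succ hil

theorem pvUnvisited_add_notmem (univ vis : List String) (w : String) (hw : w ∉ univ) :
    pvUnvisited univ (PySem.Set.add vis w) = pvUnvisited univ vis := by
  unfold pvUnvisited
  congr 1
  apply List.filter_congr
  intro x hx
  have hxw : x ≠ w := fun h => hw (h ▸ hx)
  simp [PySem.Set.mem_add, hxw]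

theorem pvGetD_nil_of_not_mem_univ (g : PySem.Dict String (List String)) (u : String)
    (hu : u ∉ pvUniv g) : g.getD u [] = [] := by
  have hk : u ∉ g.keys := fun h => hu (List.mem_append_left _ h)
  rw [PySem.Dict.getD, (PySem.Dict.get?_eq_none_iff_not_mem_keys g u).mpr hk]
  rfl

/-- One edge of B's saturation pass: `if src in reached and dst not in reached: add; changed=True`
(`srcP`/`dstP` pick the endpoints — forward pass reads an edge source-to-target, backward pass
target-to-source). -/
def pvPassStep (srcP dstP : String × String → String)
    (acc : PySem.Set String × Bool) (e : String × String) : PySem.Set String × Bool :=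
  if srcP e ∈ acc.1 ∧ dstP e ∉ acc.1 then (PySem.Set.add acc.1 (dstP e), true) else acc

theorem pvPass_mono (srcP dstP : String × String → String) :
    ∀ (l : List (String × String)) (acc : PySem.Set String × Bool) (x : String),
    x ∈ acc.1 → x ∈ (l.foldl (pvPassStep srcP dstP) acc).1 := by
  intro l
  induction l with
  | nil => exact fun acc x hx => hx
  | cons e l ih =>
    intro acc x hx
    rw [List.foldl_cons]
    apply ih
    unfold pvPassStep
    split
    · exact (PySem.Set.mem_add _ _ _).mpr (Or.inl hx)
    · exact hx

/-- A pass that reports `changed` really added a fresh node, and that node is an edge target. -/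
theorem pvPass_new (srcP dstP : String × String → String) :
    ∀ (l : List (String × String)) (acc : PySem.Set String × Bool),
    (l.foldl (pvPassStep srcP dstP) acc).2 = true →
    acc.2 = true ∨ ∃ w, w ∈ (l.foldl (pvPassStep srcP dstP) acc).1 ∧ w ∉ acc.1 ∧ w ∈ l.map dstP := by
  intro l
  induction l with
  | nil => exact fun acc h => Or.inl h
  | cons e l ih =>
    intro acc h
    rw [List.foldl_cons] at h ⊢
    by_cases hc : srcP e ∈ acc.1 ∧ dstP e ∉ acc.1
    · refine Or.inr ⟨dstP e, ?_, hc.2, List.mem_cons_self⟩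
      apply pvPass_mono
      rw [pvPassStep, if_pos hc]
      exact (PySem.Set.mem_add _ _ _).mpr (Or.inr rfl)
    · rw [pvPassStep, if_neg hc] at h ⊢
      rcases ih acc h with h2 | ⟨w, hw1, hw2, hw3⟩
      · exact Or.inl h2
      · exact Or.inr ⟨w, hw1, hw2, List.mem_cons_of_mem _ hw3⟩

-- ===== PORT A =====

/-- `graph.get(current_node, [])`. -/
def pvNbrsA (g : PySem.Dict String (List String)) (u : String) : List String := g.getD u []

/-- A's `node_reachable_from` while-loop.  The Lean stack keeps the TOP AT THE HEAD
(Python pops from the end and extends with the neighbour list, so the popped order of the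
extension is the reversed neighbour list — hence `.reverse ++ rest`). -/
def pvDfsA (g : PySem.Dict String (List String)) (vis : PySem.Set String)
    (stack : List String) : PySem.Set String :=
  match stack with
  | [] => vis
  | current :: rest =>
    if current ∈ vis then
      pvDfsA g vis rest
    else
      pvDfsA g (PySem.Set.add vis current) ((pvNbrsA g current).reverse ++ rest)
termination_by (pvUnvisited (pvUniv g) vis, stack.length)
decreasing_by
  · exact Prod.Lex.right _ (Nat.lt_succ_self _)
  · rename_i hvis
    by_cases hU : current ∈ pvUniv g
    · exact Prod.Lex.left _ _
        (pvUnvisited_lt (pvUniv g) vis (PySem.Set.add vis current)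
          (fun x hx => (PySem.Set.mem_add vis current x).mpr (Or.inl hx)) current hU
          ((PySem.Set.mem_add vis current current).mpr (Or.inr rfl)) hvis)
    · have h1 : pvNbrsA g current = [] := pvGetD_nil_of_not_mem_univ g current hU
      have h2 : pvUnvisited (pvUniv g) (PySem.Set.add vis current)
          = pvUnvisited (pvUniv g) vis := pvUnvisited_add_notmem _ vis current hU
      rw [h1, h2]
      exact Prod.Lex.right _ (by simp)

/-- A's `reverse_graph` (defaultdict(list) + append = `modify nb [] (· ++ [node])`). -/
def pvReverseA (g : PySem.Dict String (List String)) : PySem.Dict String (List String) :=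
  g.items.foldl
    (fun rg p => p.2.foldl (fun rg2 nb => rg2.modify nb [] (fun l => l ++ [p.1])) rg)
    (PySem.Dict.mk [])

def prune_non_used_nodes_in_graph (graph : List (String × List String))
    (start_node : String) (end_node : String) : List (String × List String) :=
  let g := PySem.Dict.mk graph
  let from_start := pvDfsA g PySem.Set.empty [start_node]
  let to_end := pvDfsA (pvReverseA g) PySem.Set.empty [end_node]
  let keep := PySem.Set.inter from_start to_end
  (g.items.foldl
    (fun d p =>
      if p.1 ∈ keep then d.insert p.1 (p.2.filter (fun n => decide (n ∈ keep))) else d)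
    (PySem.Dict.mk [])).items

-- ===== PORT B =====

/-- B's `edges = [(u, v) for u, neighbors in graph.items() for v in neighbors]`. -/
def pvEdges (g : PySem.Dict String (List String)) : List (String × String) :=
  g.items.flatMap (fun p => p.2.map (fun v => (p.1, v)))

/-- B's `while changed:` saturation loop: one full pass over the edge list per round,
repeated until a pass adds nothing. -/
def pvSat (srcP dstP : String × String → String) (edges : List (String × String))
    (reached : PySem.Set String) : PySem.Set String :=
  let p := edges.foldl (pvPassStep srcP dstP) (reached, false)
  if hp : p.2 = true then pvSat srcP dstP edges p.1 else p.1
termination_by pvUnvisited (edges.map dstP) reached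
decreasing_by
  simp only [p, List.foldl_attach] at hp ⊢
  rcases pvPass_new srcP dstP edges (reached, false) hp with h | ⟨w, hw1, hw2, hw3⟩
  · cases h
  · exact pvUnvisited_lt (edges.map dstP) reached _
      (fun x hx => pvPass_mono srcP dstP edges (reached, false) x hx) w hw3 hw1 hw2

def prune_non_used_nodes_in_graph_alt (graph : List (String × List String))
    (start_node : String) (end_node : String) : List (String × List String) :=
  let g := PySem.Dict.mk graph
  let edges := pvEdges g
  let from_start := pvSat (fun e => e.1) (fun e => e.2) edges (PySem.Set.ofList [start_node])
  let to_end := pvSat (fun e => e.2) (fun e => e.1) edges (PySem.Set.ofList [end_node])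
  (g.items.foldl
    (fun d p =>
      if p.1 ∈ from_start ∧ p.1 ∈ to_end then
        d.insert p.1 (p.2.filter (fun n => decide (n ∈ from_start) && decide (n ∈ to_end)))
      else d)
    (PySem.Dict.mk [])).items

-- ===== PRECONDITION & SPEC =====

-- Pre_ excludes association lists with duplicate keys: those do not denote a Python dict
-- (dict construction collapses duplicates), so the assoc-list behaviour there is accidental.
def Pre_prune_non_used_nodes_in_graph (graph : List (String × List String))
    (start_node : String) (end_node : String) : Prop :=
  (graph.map Prod.fst).Nodup

instance (graph : List (String × List String)) (start_node : String) (end_node : String) :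
    Decidable (Pre_prune_non_used_nodes_in_graph graph start_node end_node) := by
  unfold Pre_prune_non_used_nodes_in_graph; infer_instance

def pvWitness_prune_non_used_nodes_in_graph : (List (String × List String)) × String × String :=
  ([("a", ["b"]), ("b", [])], "a", "b")

def Spec_prune_non_used_nodes_in_graph (graph : List (String × List String))
    (start_node : String) (end_node : String) (out : List (String × List String)) : Prop :=
  out = prune_non_used_nodes_in_graph_alt graph start_node end_node

instance (graph : List (String × List String)) (start_node : String) (end_node : String)
    (out : List (String × List String)) :
    Decidable (Spec_prune_non_used_nodes_in_graph graph start_node end_node out) := by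
  unfold Spec_prune_non_used_nodes_in_graph; infer_instance

-- ===== CLAIM (what is proved, stated in full; the proofs are below) =====
def Claim_equal_prune_non_used_nodes_in_graph : Prop := ∀ (graph : List (String × List String)) (start_node : String) (end_node : String), Dom_prune_non_used_nodes_in_graph graph start_node end_node → Pre_prune_non_used_nodes_in_graph graph start_node end_node → Spec_prune_non_used_nodes_in_graph graph start_node end_node (prune_non_used_nodes_in_graph graph start_node end_node)

-- ===== LEMMAS AND PROOFS =====

/-- Reachability along dict edges — the characterisation of A's searches. -/
def pvReach (g : PySem.Dict String (List String)) (src x : String) : Prop :=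
  Relation.ReflTransGen (fun u v => v ∈ g.getD u []) src x

/-- A set containing `src`, closed under the step relation and containing only reachable
nodes is exactly the reachable set. -/
theorem pvChar_of (r : String → String → Prop) (src : String) (S : List String)
    (h1 : src ∈ S) (h2 : ∀ u ∈ S, ∀ v, r u v → v ∈ S)
    (h3 : ∀ x ∈ S, Relation.ReflTransGen r src x) :
    ∀ x, x ∈ S ↔ Relation.ReflTransGen r src x := by
  intro x
  constructor
  · exact h3 x
  · intro hr
    induction hr with
    | refl => exact h1
    | tail _ step ih => exact h2 _ ih _ step

-- ----- A: the stack DFS computes the reachable set -----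

theorem pvDfsA_super (g : PySem.Dict String (List String)) (vis : PySem.Set String)
    (stack : List String) : ∀ x, x ∈ vis ∨ x ∈ stack → x ∈ pvDfsA g vis stack := by
  induction vis, stack using pvDfsA.induct with
  | g => exact g
  | case1 vis =>
    intro x hx
    rw [pvDfsA]
    rcases hx with h | h
    · exact h
    · cases h
  | case2 vis current rest hmem ih =>
    intro x hx
    rw [pvDfsA, if_pos hmem]
    apply ih
    rcases hx with h | h
    · exact Or.inl h
    · rcases List.mem_cons.mp h with rfl | h2
      · exact Or.inl hmem
      · exact Or.inr h2
  | case3 vis current rest hmem ih =>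
    intro x hx
    rw [pvDfsA, if_neg hmem]
    apply ih
    rcases hx with h | h
    · exact Or.inl ((PySem.Set.mem_add _ _ _).mpr (Or.inl h))
    · rcases List.mem_cons.mp h with rfl | h2
      · exact Or.inl ((PySem.Set.mem_add _ _ _).mpr (Or.inr rfl))
      · exact Or.inr (List.mem_append_right _ h2)

theorem pvDfsA_sound (g : PySem.Dict String (List String)) (src : String)
    (vis : PySem.Set String) (stack : List String)
    (hv : ∀ x ∈ vis, pvReach g src x) (hs : ∀ x ∈ stack, pvReach g src x) :
    ∀ x ∈ pvDfsA g vis stack, pvReach g src x := by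
  revert hv hs
  induction vis, stack using pvDfsA.induct with
  | g => exact g
  | case1 vis =>
    intro hv hs x hx
    rw [pvDfsA] at hx
    exact hv x hx
  | case2 vis current rest hmem ih =>
    intro hv hs x hx
    rw [pvDfsA, if_pos hmem] at hx
    exact ih hv (fun y hy => hs y (List.mem_cons_of_mem _ hy)) x hx
  | case3 vis current rest hmem ih =>
    intro hv hs x hx
    rw [pvDfsA, if_neg hmem] at hx
    have hcur : pvReach g src current := hs current List.mem_cons_self
    refine ih ?_ ?_ x hx
    · intro y hy
      rcases (PySem.Set.mem_add _ _ _).mp hy with h | rfl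
      · exact hv y h
      · exact hcur
    · intro y hy
      rcases List.mem_append.mp hy with h | h
      · exact Relation.ReflTransGen.tail hcur (by
          have : y ∈ pvNbrsA g current := List.mem_reverse.mp h
          exact this)
      · exact hs y (List.mem_cons_of_mem _ h)

theorem pvDfsA_closed (g : PySem.Dict String (List String)) (vis : PySem.Set String)
    (stack : List String)
    (hcl : ∀ u ∈ vis, ∀ v ∈ g.getD u [], v ∈ vis ∨ v ∈ stack) :
    ∀ u ∈ pvDfsA g vis stack, ∀ v ∈ g.getD u [], v ∈ pvDfsA g vis stack := by
  revert hcl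
  induction vis, stack using pvDfsA.induct with
  | g => exact g
  | case1 vis =>
    intro hcl u hu v hv
    rw [pvDfsA] at hu ⊢
    rcases hcl u hu v hv with h | h
    · exact h
    · cases h
  | case2 vis current rest hmem ih =>
    intro hcl u hu v hv
    rw [pvDfsA, if_pos hmem] at hu ⊢
    refine ih ?_ u hu v hv
    intro u' hu' v' hv'
    rcases hcl u' hu' v' hv' with h | h
    · exact Or.inl h
    · rcases List.mem_cons.mp h with rfl | h2
      · exact Or.inl hmem
      · exact Or.inr h2
  | case3 vis current rest hmem ih =>
    intro hcl u hu v hv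
    rw [pvDfsA, if_neg hmem] at hu ⊢
    refine ih ?_ u hu v hv
    intro u' hu' v' hv'
    rcases (PySem.Set.mem_add _ _ _).mp hu' with h | rfl
    · rcases hcl u' h v' hv' with h2 | h2
      · exact Or.inl ((PySem.Set.mem_add _ _ _).mpr (Or.inl h2))
      · rcases List.mem_cons.mp h2 with rfl | h3
        · exact Or.inl ((PySem.Set.mem_add _ _ _).mpr (Or.inr rfl))
        · exact Or.inr (List.mem_append_right _ h3)
    · exact Or.inr (List.mem_append_left _ (List.mem_reverse.mpr hv'))

theorem pvDfsA_char (g : PySem.Dict String (List String)) (src : String) :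
    ∀ x, x ∈ pvDfsA g PySem.Set.empty [src] ↔ pvReach g src x := by
  apply pvChar_of
  · exact pvDfsA_super g _ _ src (Or.inr List.mem_cons_self)
  · exact fun u hu v hv => pvDfsA_closed g _ _ (by intro u hu; cases hu) u hu v hv
  · exact pvDfsA_sound g src _ _ (by intro x hx; cases hx)
      (by intro x hx; rw [List.mem_singleton.mp hx]; exact Relation.ReflTransGen.refl)

-- ----- B: the saturation loop computes the reachable set -----

theorem pvPass_flag_mono (srcP dstP : String × String → String) :
    ∀ (l : List (String × String)) (acc : PySem.Set String × Bool),
    acc.2 = true → (l.foldl (pvPassStep srcP dstP) acc).2 = true := by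
  intro l
  induction l with
  | nil => exact fun acc h => h
  | cons e l ih =>
    intro acc h
    rw [List.foldl_cons]
    apply ih
    unfold pvPassStep
    split
    · rfl
    · exact h

/-- A pass that did not report `changed` left the set unchanged, and every scanned edge
from an in-set source has an in-set target. -/
theorem pvPass_fix (srcP dstP : String × String → String) :
    ∀ (l : List (String × String)) (S : PySem.Set String),
    (l.foldl (pvPassStep srcP dstP) (S, false)).2 = false →
    (l.foldl (pvPassStep srcP dstP) (S, false)).1 = S ∧
      ∀ e ∈ l, srcP e ∈ S → dstP e ∈ S := by
  intro l
  induction l with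
  | nil => exact fun S _ => ⟨rfl, fun e he => absurd he List.not_mem_nil⟩
  | cons e l ih =>
    intro S h
    rw [List.foldl_cons] at h ⊢
    by_cases hc : srcP e ∈ S ∧ dstP e ∉ S
    · exfalso
      rw [show pvPassStep srcP dstP (S, false) e = (PySem.Set.add S (dstP e), true) from by
        rw [pvPassStep, if_pos hc]] at h
      rw [pvPass_flag_mono srcP dstP l _ rfl] at h
      cases h
    · rw [show pvPassStep srcP dstP (S, false) e = (S, false) from by
        rw [pvPassStep, if_neg hc]] at h ⊢
      rcases ih S h with ⟨h1, h2⟩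
      refine ⟨h1, fun e' he' hs => ?_⟩
      rcases List.mem_cons.mp he' with rfl | he2
      · by_contra hd
        exact hc ⟨hs, hd⟩
      · exact h2 e' he2 hs

/-- A pass preserves any predicate that holds on the set and is closed along the edges. -/
theorem pvPass_sound (srcP dstP : String × String → String) (P : String → Prop) :
    ∀ (l : List (String × String)) (acc : PySem.Set String × Bool),
    (∀ x ∈ acc.1, P x) → (∀ e ∈ l, P (srcP e) → P (dstP e)) →
    ∀ x ∈ (l.foldl (pvPassStep srcP dstP) acc).1, P x := by
  intro l
  induction l with
  | nil => exact fun acc h _ => h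
  | cons e l ih =>
    intro acc h hcl
    rw [List.foldl_cons]
    refine ih _ ?_ (fun e' he' => hcl e' (List.mem_cons_of_mem _ he'))
    intro x hx
    unfold pvPassStep at hx
    split at hx
    · rename_i hc
      rcases (PySem.Set.mem_add _ _ _).mp hx with h2 | rfl
      · exact h x h2
      · exact hcl e List.mem_cons_self (h _ hc.1)
    · exact h x hx

theorem pvSat_super (srcP dstP : String × String → String) (edges : List (String × String)) :
    ∀ (reached : PySem.Set String) (x : String),
    x ∈ reached → x ∈ pvSat srcP dstP edges reached := by
  intro reached
  induction reached using pvSat.induct srcP dstP edges with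
  | case1 S p hp ih =>
    intro x hx
    simp only [p, List.foldl_attach] at hp ih
    rw [pvSat, dif_pos hp]
    exact ih x (pvPass_mono srcP dstP edges (S, false) x hx)
  | case2 S p hp =>
    intro x hx
    simp only [p, List.foldl_attach] at hp
    rw [pvSat, dif_neg hp]
    exact pvPass_mono srcP dstP edges (S, false) x hx

theorem pvSat_sound (srcP dstP : String × String → String) (edges : List (String × String))
    (P : String → Prop) (hcl : ∀ e ∈ edges, P (srcP e) → P (dstP e)) :
    ∀ (reached : PySem.Set String), (∀ x ∈ reached, P x) →
    ∀ x ∈ pvSat srcP dstP edges reached, P x := by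
  intro reached
  induction reached using pvSat.induct srcP dstP edges with
  | case1 S p hp ih =>
    intro h x hx
    simp only [p, List.foldl_attach] at hp ih
    rw [pvSat, dif_pos hp] at hx
    exact ih (pvPass_sound srcP dstP P edges (S, false) h hcl) x hx
  | case2 S p hp =>
    intro h x hx
    simp only [p, List.foldl_attach] at hp
    rw [pvSat, dif_neg hp] at hx
    exact pvPass_sound srcP dstP P edges (S, false) h hcl x hx

theorem pvSat_closed (srcP dstP : String × String → String) (edges : List (String × String)) :
    ∀ (reached : PySem.Set String), ∀ e ∈ edges,
    srcP e ∈ pvSat srcP dstP edges reached → dstP e ∈ pvSat srcP dstP edges reached := by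
  intro reached
  induction reached using pvSat.induct srcP dstP edges with
  | case1 S p hp ih =>
    intro e he hs
    simp only [p, List.foldl_attach] at hp ih
    rw [pvSat, dif_pos hp] at hs ⊢
    exact ih e he hs
  | case2 S p hp =>
    intro e he hs
    simp only [p, List.foldl_attach] at hp
    rw [pvSat, dif_neg hp] at hs ⊢
    have hfix := pvPass_fix srcP dstP edges S (by simpa using hp)
    rw [hfix.1] at hs ⊢
    exact hfix.2 e he hs

theorem pvSat_char (srcP dstP : String × String → String) (edges : List (String × String))
    (seed : String) :
    ∀ x, x ∈ pvSat srcP dstP edges (PySem.Set.ofList [seed]) ↔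
      Relation.ReflTransGen (fun a b => ∃ e ∈ edges, srcP e = a ∧ dstP e = b) seed x := by
  apply pvChar_of
  · exact pvSat_super srcP dstP edges _ seed (by simp [PySem.Set.mem_ofList])
  · intro u hu v hv
    rcases hv with ⟨e, he, hsrc, hdst⟩
    exact hdst ▸ pvSat_closed srcP dstP edges _ e he (hsrc ▸ hu)
  · refine pvSat_sound srcP dstP edges _ ?_ _ ?_
    · exact fun e he hs => Relation.ReflTransGen.tail hs ⟨e, he, rfl, rfl⟩
    · intro x hx
      have : x = seed := by simpa [PySem.Set.mem_ofList] using hx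
      exact this ▸ Relation.ReflTransGen.refl

-- ----- bridges between the edge list and the dict lookups -----

theorem pvMem_edges (g : PySem.Dict String (List String)) (u v : String) :
    (u, v) ∈ pvEdges g ↔ ∃ p ∈ g.items, p.1 = u ∧ v ∈ p.2 := by
  unfold pvEdges
  simp only [List.mem_flatMap, List.mem_map]
  constructor
  · rintro ⟨p, hp, w, hw, hwe⟩
    obtain ⟨h1, h2⟩ := Prod.mk.injEq .. ▸ hwe
    exact ⟨p, hp, h1, h2 ▸ hw⟩
  · rintro ⟨p, hp, h1, h2⟩
    exact ⟨p, hp, v, h2, by rw [h1]⟩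

theorem pvEdges_iff_getD (graph : List (String × List String))
    (hnd : (graph.map Prod.fst).Nodup) (u v : String) :
    (u, v) ∈ pvEdges (PySem.Dict.mk graph) ↔ v ∈ (PySem.Dict.mk graph).getD u [] := by
  rw [pvMem_edges]
  constructor
  · rintro ⟨p, hp, h1, h2⟩
    have hp' : (u, p.2) ∈ (PySem.Dict.mk graph).items := by rw [← h1]; exact hp
    have hget : (PySem.Dict.mk graph).get? u = some p.2 :=
      PySem.Dict.get?_of_mem_items _ hp' (by simpa [PySem.Dict.keys] using hnd)
    rw [PySem.Dict.getD_of_get?_eq_some _ [] hget]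
    exact h2
  · intro hv
    rcases hq : (PySem.Dict.mk graph).get? u with _ | l
    · rw [PySem.Dict.getD_eq_get?_getD, hq] at hv
      cases hv
    · rw [PySem.Dict.getD_of_get?_eq_some _ [] hq] at hv
      exact ⟨(u, l), PySem.Dict.mem_items_of_get?_eq_some _ hq, rfl, hv⟩

/-- The reversed dict's adjacency is exactly edge membership read backwards. -/
theorem pvReverseA_getD (g : PySem.Dict String (List String)) (a u : String) :
    u ∈ (pvReverseA g).getD a [] ↔ (u, a) ∈ pvEdges g := by
  have hfold : pvReverseA g
      = (g.items.flatMap (fun p => p.2.map (fun nb => (nb, p.1)))).foldl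
          (fun d q => d.modify q.1 [] (fun l => l ++ [q.2])) (PySem.Dict.mk []) := by
    unfold pvReverseA
    generalize (PySem.Dict.mk ([] : List (String × List String))) = d0
    induction g.items generalizing d0 with
    | nil => rfl
    | cons p rest ih =>
      rw [List.foldl_cons, List.flatMap_cons, List.foldl_append, ih]
      congr 1
      rw [List.foldl_map]
  rw [hfold, PySem.Dict.getD_foldl_modify_append]
  rw [show (PySem.Dict.mk ([] : List (String × List String))).getD a [] = [] from rfl,
    List.nil_append]
  constructor
  · intro h
    rcases List.mem_map.mp h with ⟨q, hq, hqe⟩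
    have hq1 : q.1 = a := by simpa using (List.mem_filter.mp hq).2
    have hqm := (List.mem_filter.mp hq).1
    rcases List.mem_flatMap.mp hqm with ⟨p, hp, hq2⟩
    rcases List.mem_map.mp hq2 with ⟨nb, hnb, hnbe⟩
    have e1 : nb = q.1 := congrArg Prod.fst hnbe
    have e2 : p.1 = q.2 := congrArg Prod.snd hnbe
    rw [pvMem_edges]
    exact ⟨p, hp, by rw [e2, hqe], by rw [← e1] at hq1; exact hq1 ▸ hnb⟩
  · intro h
    rcases (pvMem_edges g u a).mp h with ⟨p, hp, h1, h2⟩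
    have : (a, u) ∈ g.items.flatMap (fun p => p.2.map (fun nb => (nb, p.1))) := by
      exact List.mem_flatMap.mpr ⟨p, hp, List.mem_map.mpr ⟨a, h2, by rw [h1]⟩⟩
    simp only [List.mem_map]
    exact ⟨(a, u), List.mem_filter.mpr ⟨this, by simp⟩, rfl⟩

/-- The two output-building folds agree when the membership tests agree pointwise. -/
theorem pvBuild_congr (items : List (String × List String))
    (KA SB TB : PySem.Set String)
    (h : ∀ x, x ∈ KA ↔ (x ∈ SB ∧ x ∈ TB)) :
    items.foldl
      (fun d p =>
        if p.1 ∈ KA then d.insert p.1 (p.2.filter (fun n => decide (n ∈ KA))) else d)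
      (PySem.Dict.mk [])
    = items.foldl
      (fun d p =>
        if p.1 ∈ SB ∧ p.1 ∈ TB then
          d.insert p.1 (p.2.filter (fun n => decide (n ∈ SB) && decide (n ∈ TB)))
        else d)
      (PySem.Dict.mk []) := by
  have hfil : (fun n => decide (n ∈ KA)) = (fun n => decide (n ∈ SB) && decide (n ∈ TB)) := by
    funext n
    rw [decide_eq_decide.mpr (h n), Bool.decide_and]
  have hfun : (fun (d : PySem.Dict String (List String)) (p : String × List String) =>
        if p.1 ∈ KA then d.insert p.1 (p.2.filter (fun n => decide (n ∈ KA))) else d)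
      = (fun d p =>
        if p.1 ∈ SB ∧ p.1 ∈ TB then
          d.insert p.1 (p.2.filter (fun n => decide (n ∈ SB) && decide (n ∈ TB)))
        else d) := by
    funext d p
    rw [hfil]
    exact if_congr (h p.1) rfl rfl
  rw [hfun]

-- ===== VERDICT (by name: the statement is the Claim_ definition above) =====
theorem prune_non_used_nodes_in_graph_spec : Claim_equal_prune_non_used_nodes_in_graph := by
  intro graph start_node end_node _ hpre
  unfold Spec_prune_non_used_nodes_in_graph
  unfold prune_non_used_nodes_in_graph prune_non_used_nodes_in_graph_alt
  apply congrArg PySem.Dict.items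
  apply pvBuild_congr
  intro x
  rw [PySem.Set.mem_inter]
  have hF : x ∈ pvDfsA (PySem.Dict.mk graph) PySem.Set.empty [start_node]
      ↔ x ∈ pvSat (fun e => e.1) (fun e => e.2) (pvEdges (PySem.Dict.mk graph))
          (PySem.Set.ofList [start_node]) := by
    rw [pvDfsA_char, pvSat_char]
    unfold pvReach
    constructor
    · refine Relation.ReflTransGen.mono ?_
      intro a b hb
      exact ⟨(a, b), (pvEdges_iff_getD graph hpre a b).mpr hb, rfl, rfl⟩
    · refine Relation.ReflTransGen.mono ?_
      rintro a b ⟨e, he, h1, h2⟩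
      refine (pvEdges_iff_getD graph hpre a b).mp ?_
      rwa [show (a, b) = e from by rw [← h1, ← h2]]
  have hR : x ∈ pvDfsA (pvReverseA (PySem.Dict.mk graph)) PySem.Set.empty [end_node]
      ↔ x ∈ pvSat (fun e => e.2) (fun e => e.1) (pvEdges (PySem.Dict.mk graph))
          (PySem.Set.ofList [end_node]) := by
    rw [pvDfsA_char, pvSat_char]
    unfold pvReach
    constructor
    · refine Relation.ReflTransGen.mono ?_
      intro a b hb
      exact ⟨(b, a), (pvReverseA_getD (PySem.Dict.mk graph) a b).mp hb, rfl, rfl⟩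
    · refine Relation.ReflTransGen.mono ?_
      rintro a b ⟨e, he, h1, h2⟩
      refine (pvReverseA_getD (PySem.Dict.mk graph) a b).mpr ?_
      rwa [show (b, a) = e from by rw [← h1, ← h2]]
  exact and_congr hF hR
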